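-- pv_equiv track=rewrite | github.com/forever80187/PGN | main.py | count_Result
-- ===== SOURCE A (Python) =====
-- def count_Result(pred_word, true_word):
--     perfect, partial, over = [], [], []
--     n_perfect, n_miss, n_over = 0, 0, 0
--     for pred_ens in pred_word:
--         if pred_ens in true_word:
--             n_perfect += 1
--             perfect.append(pred_ens)
--             true_word.remove(pred_ens)
--     for en in perfect:
--         pred_word.remove(en)
--
--     perfect, partial, over = [], [], []
--     for true_ens in true_word:
--         if true_ens in pred_word:
--             n_perfect += 1
--             perfect.append(true_ens)
--             pred_word.remove(true_ens)
--     for en in perfect: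
--         true_word.remove(en)
--
--     if len(pred_word) != 0:
--         n_over += len(pred_word)
--     if len(true_word) != 0:
--         n_miss += len(true_word)
--     return n_perfect, n_miss, n_over
-- ===== SOURCE B (Python) =====
-- def count_Result(pred_word, true_word):
--     # Counter-based closed form; note: unlike the original, this does not mutate its arguments.
--     pc = {}
--     for w in pred_word:
--         pc[w] = pc.get(w, 0) + 1
--     tc = {}
--     for w in true_word:
--         tc[w] = tc.get(w, 0) + 1
--     n_perfect = 0
--     for w, c in pc.items():
--         t = tc.get(w, 0)
--         n_perfect += c if c < t else t
--     return n_perfect, len(true_word) - n_perfect, len(pred_word) - n_perfect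
-- ===== Notes on version B (the rewrite author's own statement) =====
-- stated objective: faster
-- what changed: Replaces A's two mutation loops with repeated list membership tests and first-occurrence removals by two hash-map counters and a closed-form sum of per-word minima, reading n_miss/n_over off the original lengths; B does not mutate its arguments (return value is identical).
import Mathlib
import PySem

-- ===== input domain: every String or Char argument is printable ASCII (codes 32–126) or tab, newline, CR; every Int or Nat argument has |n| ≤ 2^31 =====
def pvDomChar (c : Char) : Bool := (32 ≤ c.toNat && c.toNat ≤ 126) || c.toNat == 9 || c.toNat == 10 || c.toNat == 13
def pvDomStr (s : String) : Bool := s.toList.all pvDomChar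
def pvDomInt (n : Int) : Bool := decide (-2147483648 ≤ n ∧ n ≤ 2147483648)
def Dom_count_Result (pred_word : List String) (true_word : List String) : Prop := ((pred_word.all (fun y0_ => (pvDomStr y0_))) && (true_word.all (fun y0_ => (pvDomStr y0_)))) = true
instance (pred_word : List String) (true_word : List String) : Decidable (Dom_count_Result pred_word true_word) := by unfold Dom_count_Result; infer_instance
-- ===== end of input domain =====

-- B replaces A's quadratic membership/removal loops by two counters and a closed-form sum
-- (equivalence is about the RETURN value only: A mutates its list arguments in place, B does not).

-- ===== PORT A =====
-- the body of both of A's matching loops: state (n_perfect, perfect, other_list)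
def pvScan (st : Int × List String × List String) (w : String) : Int × List String × List String :=
  if w ∈ st.2.2 then (st.1 + 1, st.2.1 ++ [w], (PySem.List.remove? st.2.2 w).getD st.2.2) else st

-- 'for en in es: l.remove(en)'; the .getD l branch is unreachable in A (every en is present), so this is exact
def pvRemoveAll (l : List String) (es : List String) : List String :=
  es.foldl (fun acc e => (PySem.List.remove? acc e).getD acc) l

def count_Result (pred_word : List String) (true_word : List String) : List Int :=
  let s1 := pred_word.foldl pvScan (0, ([], true_word))
  let pw1 := pvRemoveAll pred_word s1.2.1
  let s2 := s1.2.2.foldl pvScan (s1.1, ([], pw1))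
  let tw2 := pvRemoveAll s1.2.2 s2.2.1
  let n_over : Int := if s2.2.2.length ≠ 0 then (s2.2.2.length : Int) else 0
  let n_miss : Int := if tw2.length ≠ 0 then (tw2.length : Int) else 0
  [s2.1, n_miss, n_over]

-- ===== PORT B =====
def count_Result_alt (pred_word : List String) (true_word : List String) : List Int :=
  let pc : PySem.Dict String Int := pred_word.foldl (fun d w => d.insert w (d.getD w 0 + 1)) PySem.Dict.empty
  let tc : PySem.Dict String Int := true_word.foldl (fun d w => d.insert w (d.getD w 0 + 1)) PySem.Dict.empty
  let n : Int := pc.items.foldl (fun n wc => n + (if wc.2 < tc.getD wc.1 0 then wc.2 else tc.getD wc.1 0)) 0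
  [n, (true_word.length : Int) - n, (pred_word.length : Int) - n]

-- ===== PRECONDITION & SPEC =====
def Spec_count_Result (pred_word : List String) (true_word : List String) (out : List Int) : Prop := out = count_Result_alt pred_word true_word
instance (pred_word : List String) (true_word : List String) (out : List Int) : Decidable (Spec_count_Result pred_word true_word out) := by unfold Spec_count_Result; infer_instance

-- ===== CLAIM (what is proved, stated in full; the proofs are below) =====
def Claim_equal_count_Result : Prop := ∀ (pred_word : List String) (true_word : List String), Dom_count_Result pred_word true_word → Spec_count_Result pred_word true_word (count_Result pred_word true_word)


-- ===== LEMMAS AND PROOFS =====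

-- invariants of A's matching loop: final length/counter bookkeeping of (n_perfect, perfect, other)
theorem pvScan_fold (ps : List String) : ∀ (n : Int) (perf tw : List String),
    ((ps.foldl pvScan (n, (perf, tw))).2.2.length ≤ tw.length)
  ∧ ((ps.foldl pvScan (n, (perf, tw))).1 = n + ((tw.length - (ps.foldl pvScan (n, (perf, tw))).2.2.length : ℕ) : Int))
  ∧ ((ps.foldl pvScan (n, (perf, tw))).2.1.length = perf.length + (tw.length - (ps.foldl pvScan (n, (perf, tw))).2.2.length))
  ∧ (∀ w, (ps.foldl pvScan (n, (perf, tw))).2.2.count w = tw.count w - min (ps.count w) (tw.count w))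
  ∧ (∀ w, (ps.foldl pvScan (n, (perf, tw))).2.1.count w = perf.count w + min (ps.count w) (tw.count w)) := by
  induction ps with
  | nil => intro n perf tw; simp
  | cons p ps ih =>
    intro n perf tw
    by_cases hp : p ∈ tw
    · have hstep : pvScan (n, (perf, tw)) p
          = (n + 1, (perf ++ [p], tw.erase p)) := by
        simp [pvScan, hp, PySem.List.remove?_eq_some_erase tw p hp]
      rw [List.foldl_cons, hstep]
      obtain ⟨h1, h2, h3, h4, h5⟩ := ih (n + 1) (perf ++ [p]) (tw.erase p)
      have hlen : (tw.erase p).length = tw.length - 1 := List.length_erase_of_mem hp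
      have hposp : 0 < tw.count p := List.count_pos_iff.2 hp
      have hlp : 0 < tw.length := List.length_pos_of_mem hp
      refine ⟨by omega, by rw [h2]; omega,
        by rw [h3]; simp [List.length_append]; omega, ?_, ?_⟩
      · intro w
        rw [h4 w]
        by_cases hw : w = p
        · subst hw
          rw [List.count_erase_self, List.count_cons_self]
          omega
        · rw [List.count_erase_of_ne hw, List.count_cons_of_ne (fun h => hw h.symm)]
      · intro w
        rw [h5 w]
        by_cases hw : w = p
        · subst hw
          rw [List.count_erase_self, List.count_cons_self]
          simp [List.count_append]
          omega
        · rw [List.count_erase_of_ne hw, List.count_cons_of_ne (fun h => hw h.symm)]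
          simp [List.count_append, List.count_singleton]
          exact fun h => hw h.symm
    · have hstep : pvScan (n, (perf, tw)) p = (n, (perf, tw)) := by
        simp [pvScan, hp]
      rw [List.foldl_cons, hstep]
      obtain ⟨h1, h2, h3, h4, h5⟩ := ih n perf tw
      have hzero : tw.count p = 0 := List.count_eq_zero.2 hp
      refine ⟨h1, h2, h3, ?_, ?_⟩
      · intro w
        rw [h4 w]
        by_cases hw : w = p
        · subst hw; rw [hzero]; omega
        · rw [List.count_cons_of_ne (fun h => hw h.symm)]
      · intro w
        rw [h5 w]
        by_cases hw : w = p
        · subst hw; rw [hzero]; simp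
        · rw [List.count_cons_of_ne (fun h => hw h.symm)]

-- A's 'for en in perfect: l.remove(en)' when every removed word is still present often enough
theorem pvRemoveAll_spec (es : List String) : ∀ (l : List String),
    (∀ w, es.count w ≤ l.count w) →
    (pvRemoveAll l es).length = l.length - es.length
  ∧ (∀ w, (pvRemoveAll l es).count w = l.count w - es.count w) := by
  induction es with
  | nil => intro l h; simp [pvRemoveAll]
  | cons e es ih =>
    intro l h
    have he : e ∈ l := by
      have := h e
      rw [List.count_cons_self] at this
      exact List.count_pos_iff.1 (by omega)
    have hstep : pvRemoveAll l (e :: es) = pvRemoveAll (l.erase e) es := by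
      simp [pvRemoveAll, PySem.List.remove?_eq_some_erase l e he]
    have hcount : ∀ w, es.count w ≤ (l.erase e).count w := by
      intro w
      by_cases hw : w = e
      · subst hw
        rw [List.count_erase_self]
        have := h w; rw [List.count_cons_self] at this; omega
      · rw [List.count_erase_of_ne hw]
        have := h w; rw [List.count_cons_of_ne (fun hh => hw hh.symm)] at this; omega
    obtain ⟨h1, h2⟩ := ih (l.erase e) hcount
    have hlen : (l.erase e).length = l.length - 1 := List.length_erase_of_mem he
    have hlp : 0 < l.length := List.length_pos_of_mem he
    rw [hstep]
    constructor
    · rw [h1]; simp [hlen]; omega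
    · intro w
      rw [h2 w]
      by_cases hw : w = e
      · subst hw
        rw [List.count_erase_self, List.count_cons_self]
        have := h w; rw [List.count_cons_self] at this
        omega
      · rw [List.count_erase_of_ne hw, List.count_cons_of_ne (fun hh => hw hh.symm)]

-- A's second loop never matches once the multiset intersection has been removed from both lists
theorem pvScan_fold_disjoint (ts : List String) : ∀ (n : Int) (perf pw : List String),
    (∀ x ∈ ts, x ∉ pw) → ts.foldl pvScan (n, (perf, pw)) = (n, (perf, pw)) := by
  induction ts with
  | nil => intro n perf pw _; simp
  | cons t ts ih =>
    intro n perf pw h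
    have ht : t ∉ pw := h t (by simp)
    have hstep : pvScan (n, (perf, pw)) t = (n, (perf, pw)) := by simp [pvScan, ht]
    rw [List.foldl_cons, hstep]
    exact ih n perf pw (fun x hx => h x (by simp [hx]))

-- B's sum over distinct pred words of min counts
def pvS (p t : List String) : ℕ :=
  ((PySem.Set.ofList p).map (fun k => min (p.count k) (t.count k))).sum

-- B's sum equals the cardinality of the multiset intersection
theorem pv_sum_min (p t : List String) :
    pvS p t = ((p : Multiset String) ∩ (t : Multiset String)).card := by
  have hnd := PySem.Set.nodup_ofList p
  have h1 : pvS p t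
      = ∑ a ∈ (PySem.Set.ofList p).toFinset, min (p.count a) (t.count a) :=
    (List.sum_toFinset _ hnd).symm
  have hfs : (PySem.Set.ofList p).toFinset = p.toFinset := by
    ext a; simp [List.mem_toFinset, PySem.Set.mem_ofList]
  have h2 : ∑ a ∈ ((p : Multiset String) ∩ (t : Multiset String)).toFinset,
      Multiset.count a ((p : Multiset String) ∩ (t : Multiset String))
      = ((p : Multiset String) ∩ (t : Multiset String)).card :=
    Multiset.toFinset_sum_count_eq _
  have h3 : ∑ a ∈ ((p : Multiset String) ∩ (t : Multiset String)).toFinset,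
      Multiset.count a ((p : Multiset String) ∩ (t : Multiset String))
      = ∑ a ∈ ((p : Multiset String) ∩ (t : Multiset String)).toFinset,
          min (p.count a) (t.count a) := by
    refine Finset.sum_congr rfl ?_
    intro a _
    rw [Multiset.count_inter]
    simp [Multiset.coe_count]
  have hsub : ((p : Multiset String) ∩ (t : Multiset String)).toFinset ⊆ p.toFinset := by
    intro a ha
    rw [Multiset.mem_toFinset, Multiset.mem_inter] at ha
    rw [List.mem_toFinset]
    exact_mod_cast ha.1
  have hzero : ∀ a ∈ p.toFinset, a ∉ ((p : Multiset String) ∩ (t : Multiset String)).toFinset →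
      min (p.count a) (t.count a) = 0 := by
    intro a hap ha
    rw [Multiset.mem_toFinset, Multiset.mem_inter] at ha
    rw [List.mem_toFinset] at hap
    have hat : a ∉ t := by
      intro hat
      exact ha ⟨by exact_mod_cast hap, by exact_mod_cast hat⟩
    have : t.count a = 0 := List.count_eq_zero.2 hat
    omega
  rw [h1, hfs]
  calc ∑ a ∈ p.toFinset, min (p.count a) (t.count a)
      = ∑ a ∈ ((p : Multiset String) ∩ (t : Multiset String)).toFinset,
          min (p.count a) (t.count a) := (Finset.sum_subset hsub hzero).symm
    _ = ∑ a ∈ ((p : Multiset String) ∩ (t : Multiset String)).toFinset,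
          Multiset.count a ((p : Multiset String) ∩ (t : Multiset String)) := h3.symm
    _ = ((p : Multiset String) ∩ (t : Multiset String)).card := h2

-- the first loop leaves true_word minus the multiset intersection; its length drops by pvS
theorem pv_len_tw1 (p t : List String) :
    (p.foldl pvScan (0, ([], t))).2.2.length + pvS p t = t.length := by
  obtain ⟨h1, _, _, h4, _⟩ := pvScan_fold p 0 [] t
  have hm : ((p.foldl pvScan (0, ([], t))).2.2 : Multiset String)
      = (t : Multiset String) - (p : Multiset String) := by
    rw [Multiset.ext]
    intro a
    rw [Multiset.count_sub]
    simp only [Multiset.coe_count]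
    have := h4 a
    omega
  have hcard := congrArg Multiset.card hm
  simp only [Multiset.coe_card] at hcard
  have hsub := congrArg Multiset.card
    (Multiset.sub_add_inter (t : Multiset String) (p : Multiset String))
  rw [Multiset.card_add] at hsub
  simp only [Multiset.coe_card] at hsub
  have hS := pv_sum_min p t
  rw [Multiset.inter_comm] at hS
  omega

-- pvS is at most the number of predicted words
theorem pv_S_le (p t : List String) : pvS p t ≤ p.length := by
  rw [pv_sum_min]
  calc ((p : Multiset String) ∩ (t : Multiset String)).card
      ≤ (p : Multiset String).card := Multiset.card_le_card Multiset.inter_le_left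
    _ = p.length := Multiset.coe_card _

-- reduction of B's port to the closed form
theorem pv_alt_eq (p t : List String) :
    count_Result_alt p t
      = [((pvS p t : ℕ) : Int), (t.length : Int) - (pvS p t : ℕ), (p.length : Int) - (pvS p t : ℕ)] := by
  simp only [count_Result_alt]
  rw [PySem.Dict.foldl_insert_getD_add_one_eq_counter, PySem.Dict.foldl_insert_getD_add_one_eq_counter]
  rw [PySem.List.foldl_add _
    (fun wc : String × Int => if wc.2 < (PySem.Dict.counter t).getD wc.1 0 then wc.2 else (PySem.Dict.counter t).getD wc.1 0) 0]
  rw [PySem.Dict.items_counter, List.map_map]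
  have hmap : (PySem.Set.ofList p).map
      ((fun wc : String × Int => if wc.2 < (PySem.Dict.counter t).getD wc.1 0 then wc.2 else (PySem.Dict.counter t).getD wc.1 0)
        ∘ (fun k => (k, (List.count k p : Int))))
      = (PySem.Set.ofList p).map (fun k => ((min (p.count k) (t.count k) : ℕ) : Int)) := by
    refine List.map_congr_left ?_
    intro k _
    simp only [Function.comp, PySem.Dict.getD_counter]
    split_ifs <;> omega
  rw [hmap]
  have hsum : ((PySem.Set.ofList p).map (fun k => ((min (p.count k) (t.count k) : ℕ) : Int))).sum
      = ((pvS p t : ℕ) : Int) := by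
    symm
    rw [pvS, Nat.cast_list_sum, List.map_map]
    rfl
  rw [hsum]
  simp

-- removing the empty 'perfect' list is a no-op
theorem pvRemoveAll_nil (l : List String) : pvRemoveAll l [] = l := rfl

-- reduction of A's port to the same closed form
theorem pv_a_eq (p t : List String) :
    count_Result p t
      = [((pvS p t : ℕ) : Int), (t.length : Int) - (pvS p t : ℕ), (p.length : Int) - (pvS p t : ℕ)] := by
  obtain ⟨h1, h2, h3, h4, h5⟩ := pvScan_fold p 0 [] t
  have hlen := pv_len_tw1 p t
  have hSle := pv_S_le p t
  have hperfc : ∀ w, (p.foldl pvScan (0, ([], t))).2.1.count w ≤ p.count w := by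
    intro w
    have := h5 w
    simp only [List.count_nil] at this
    omega
  obtain ⟨hrl, hrc⟩ := pvRemoveAll_spec (p.foldl pvScan (0, ([], t))).2.1 p hperfc
  have hdis : ∀ x ∈ (p.foldl pvScan (0, ([], t))).2.2,
      x ∉ pvRemoveAll p (p.foldl pvScan (0, ([], t))).2.1 := by
    intro x hx hxp
    have hcx : 0 < (p.foldl pvScan (0, ([], t))).2.2.count x := List.count_pos_iff.2 hx
    have hcp : 0 < (pvRemoveAll p (p.foldl pvScan (0, ([], t))).2.1).count x := List.count_pos_iff.2 hxp
    have e1 := h4 x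
    have e2 := h5 x
    have e3 := hrc x
    simp only [List.count_nil] at e1 e2
    omega
  have hloop2 := pvScan_fold_disjoint (p.foldl pvScan (0, ([], t))).2.2
    (p.foldl pvScan (0, ([], t))).1 [] (pvRemoveAll p (p.foldl pvScan (0, ([], t))).2.1) hdis
  simp only [count_Result]
  rw [hloop2, pvRemoveAll_nil]
  simp only [List.length_nil] at h3
  congr 1
  · -- n_perfect
    rw [h2]
    omega
  congr 1
  · -- n_miss
    split_ifs with hh <;> omega
  congr 1
  · -- n_over
    rw [hrl, h3]
    split_ifs with hh <;> omega

-- ===== VERDICT (by name: the statement is the Claim_ definition above) =====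
theorem count_Result_spec : Claim_equal_count_Result := by
  intro pred_word true_word _
  unfold Spec_count_Result
  rw [pv_a_eq, pv_alt_eq]
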